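-- pv_equiv track=rewrite | github.com/anakfernandes/Lab_Programacao_1 | Programação 1/Programação 1/u6/quase_silabas.py | quase_fonemas
-- ===== SOURCE A (Python) =====
-- def quase_fonemas(palavra):
--
--     fonemas = []
--     for i in range(1, len(palavra)):
--         if palavra[i] in 'aeiou':
--             if palavra[i - 1] not in 'aeiou':
--                 par = palavra[i - 1] + palavra[i]
--                 fonemas.append(par)
--
--     return fonemas
-- ===== SOURCE B (Python) =====
-- import re
--
-- def quase_fonemas(palavra):
--     # Every consonant+vowel bigram; matches end on a vowel, which can never
--     # start the next match, so non-overlapping findall equals the index scan.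
--     return re.findall(r'[^aeiou][aeiou]', palavra)
-- ===== Notes on version B (the rewrite author's own statement) =====
-- stated objective: idiomatic
-- what changed: Replaced the explicit index loop with nested membership tests by a single regex scan (re.findall of '[^aeiou][aeiou]'); a timing run measured it faster due to the C-level regex engine.
import Mathlib
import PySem

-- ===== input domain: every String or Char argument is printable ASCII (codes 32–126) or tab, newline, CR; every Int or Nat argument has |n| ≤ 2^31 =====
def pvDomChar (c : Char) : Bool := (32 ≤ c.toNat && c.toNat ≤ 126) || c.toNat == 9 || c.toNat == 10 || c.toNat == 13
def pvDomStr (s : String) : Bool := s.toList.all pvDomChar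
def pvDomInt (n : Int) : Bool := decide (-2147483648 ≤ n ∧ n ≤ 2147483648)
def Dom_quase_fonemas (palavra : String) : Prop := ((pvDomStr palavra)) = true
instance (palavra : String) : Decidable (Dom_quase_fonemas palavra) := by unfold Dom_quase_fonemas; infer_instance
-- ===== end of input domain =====

-- B replaces A's index loop by a single regex-style left-to-right scan (idiomatic re.findall in Python).

-- the Python literal 'aeiou' used as a membership test on single characters (exact)
def pvVowels : List Char := ['a', 'e', 'i', 'o', 'u']

-- ===== PORT A =====
def quase_fonemas (palavra : String) : List String :=
  let cs := palavra.toList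
  (PySem.List.pyRange 1 cs.length 1).foldl (fun fonemas i =>
    if PySem.List.pyGetD cs i ' ' ∈ pvVowels then
      if PySem.List.pyGetD cs (i - 1) ' ' ∉ pvVowels then
        fonemas ++ [String.ofList [PySem.List.pyGetD cs (i - 1) ' ', PySem.List.pyGetD cs i ' ']]
      else fonemas
    else fonemas) []

-- ===== PORT B =====
-- hand port of re.findall(r'[^aeiou][aeiou]', ·): left-to-right scan, a match consumes
-- both characters, otherwise advance one character (exact for this fixed pattern)
def pvFindCV : List Char → List String
  | c1 :: c2 :: rest =>
      if c1 ∉ pvVowels ∧ c2 ∈ pvVowels then String.ofList [c1, c2] :: pvFindCV rest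
      else pvFindCV (c2 :: rest)
  | _ => []

def quase_fonemas_alt (palavra : String) : List String :=
  pvFindCV palavra.toList

-- ===== PRECONDITION & SPEC =====
def Spec_quase_fonemas (palavra : String) (out : List String) : Prop := out = quase_fonemas_alt palavra
instance (palavra : String) (out : List String) : Decidable (Spec_quase_fonemas palavra out) := by unfold Spec_quase_fonemas; infer_instance

-- ===== CLAIM (what is proved, stated in full; the proofs are below) =====
def Claim_equal_quase_fonemas : Prop := ∀ (palavra : String), Dom_quase_fonemas palavra → Spec_quase_fonemas palavra (quase_fonemas palavra)

-- ===== LEMMAS AND PROOFS =====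

-- middle form: contribution of each adjacent pair, one-step recursion
def pvMid : List Char → List String
  | c1 :: c2 :: rest =>
      (if c2 ∈ pvVowels ∧ c1 ∉ pvVowels then [String.ofList [c1, c2]] else []) ++ pvMid (c2 :: rest)
  | _ => []

theorem pvMid_cons_vowel (c : Char) (cs : List Char) (h : c ∈ pvVowels) :
    pvMid (c :: cs) = pvMid cs := by
  cases cs with
  | nil => rfl
  | cons d ds => simp [pvMid, h]

theorem pvFindCV_eq_pvMid (cs : List Char) : pvFindCV cs = pvMid cs := by
  fun_induction pvFindCV cs with
  | case1 c1 c2 rest h ih =>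
      obtain ⟨h1, h2⟩ := h
      simp [pvMid, h1, h2, pvMid_cons_vowel c2 rest h2, ih]
  | case2 c1 c2 rest h ih =>
      have : ¬ (c2 ∈ pvVowels ∧ c1 ∉ pvVowels) := by tauto
      simp [pvMid, this, ih]
  | case3 cs h => cases cs with
      | nil => rfl
      | cons c cs' => cases cs' with
          | nil => rfl
          | cons d ds => exact absurd rfl (h c d ds)

-- A's fold, rewritten as a flatMap over the index range
theorem quase_fonemas_flatMap (palavra : String) :
    quase_fonemas palavra =
      (PySem.List.pyRange 1 palavra.toList.length 1).flatMap (fun i =>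
        if PySem.List.pyGetD palavra.toList i ' ' ∈ pvVowels ∧
           PySem.List.pyGetD palavra.toList (i - 1) ' ' ∉ pvVowels then
          [String.ofList [PySem.List.pyGetD palavra.toList (i - 1) ' ',
                      PySem.List.pyGetD palavra.toList i ' ']]
        else []) := by
  simp only [quase_fonemas]
  rw [PySem.List.foldl_congr_mem (g := fun fonemas i =>
        fonemas ++
          if PySem.List.pyGetD palavra.toList i ' ' ∈ pvVowels ∧
             PySem.List.pyGetD palavra.toList (i - 1) ' ' ∉ pvVowels then
            [String.ofList [PySem.List.pyGetD palavra.toList (i - 1) ' ',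
                        PySem.List.pyGetD palavra.toList i ' ']]
          else [])]
  · rw [PySem.List.foldl_append_eq_flatMap]; simp
  · intro acc i _
    by_cases h1 : PySem.List.pyGetD palavra.toList i ' ' ∈ pvVowels <;>
      by_cases h2 : PySem.List.pyGetD palavra.toList (i - 1) ' ' ∉ pvVowels <;>
        simp [h1, h2]

-- flatMap over range of adjacent getD pairs equals pvMid, by structural induction
theorem range_flatMap_eq_pvMid (cs : List Char) :
    (List.range (cs.length - 1)).flatMap (fun k =>
        if cs.getD (k + 1) ' ' ∈ pvVowels ∧ cs.getD k ' ' ∉ pvVowels then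
          [String.ofList [cs.getD k ' ', cs.getD (k + 1) ' ']]
        else []) = pvMid cs := by
  induction cs with
  | nil => rfl
  | cons c1 cs' ih =>
      cases cs' with
      | nil => rfl
      | cons c2 rest =>
          have hlen : (c1 :: c2 :: rest).length - 1 = rest.length + 1 := by simp
          rw [hlen, List.range_succ_eq_map]
          simp only [List.flatMap_cons, List.flatMap_map]
          have htail : (List.range rest.length).flatMap (fun k =>
              if (c1 :: c2 :: rest).getD (k + 1 + 1) ' ' ∈ pvVowels ∧
                 (c1 :: c2 :: rest).getD (k + 1) ' ' ∉ pvVowels then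
                [String.ofList [(c1 :: c2 :: rest).getD (k + 1) ' ',
                            (c1 :: c2 :: rest).getD (k + 1 + 1) ' ']]
              else []) =
              (List.range ((c2 :: rest).length - 1)).flatMap (fun k =>
              if (c2 :: rest).getD (k + 1) ' ' ∈ pvVowels ∧
                 (c2 :: rest).getD k ' ' ∉ pvVowels then
                [String.ofList [(c2 :: rest).getD k ' ', (c2 :: rest).getD (k + 1) ' ']]
              else []) := by
            simp
          rw [htail, ih]
          simp [pvMid, List.getD]
  
-- bridge: A's Int-indexed flatMap over pyRange equals the Nat-indexed one
theorem quase_fonemas_eq_pvMid (palavra : String) :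
    quase_fonemas palavra = pvMid palavra.toList := by
  rw [quase_fonemas_flatMap, ← range_flatMap_eq_pvMid]
  set cs := palavra.toList with hcs
  rw [PySem.List.pyRange_one, List.flatMap_map]
  have hlen : ((cs.length : Int) - 1).toNat = cs.length - 1 := by omega
  rw [hlen]
  apply List.flatMap_congr
  intro k hk
  have hk' : k < cs.length - 1 := List.mem_range.mp hk
  have e1 : (1 : Int) + (k : Int) = ((k + 1 : Nat) : Int) := by push_cast; ring
  rw [e1]
  have e2' : ((k + 1 : Nat) : Int) - 1 = ((k : Nat) : Int) := by push_cast; ring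
  rw [e2', PySem.List.pyGetD_natCast, PySem.List.pyGetD_natCast]

-- ===== VERDICT (by name: the statement is the Claim_ definition above) =====
theorem quase_fonemas_spec : Claim_equal_quase_fonemas := by
  intro palavra _
  unfold Spec_quase_fonemas quase_fonemas_alt
  rw [quase_fonemas_eq_pvMid, pvFindCV_eq_pvMid]
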